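-- pv_equiv track=rewrite | github.com/JustinGatonby/UndervaluedPropertyKNN | scrape.py | get_feature_details
-- ===== SOURCE A (Python) =====
-- def get_feature_details(start_index, page):
--     start_index = page.find('<span class="p24_icons">', start_index) + len('<span class="p24_icons">')
--     return_index = start_index
--     available_feautures = [False, False, False, False, False]
--     i = 0
--     while i < 5:
--         start_index = page.find('title="', start_index) + len('title="')
--         end_index = page.find('"', start_index)
--         item = page[start_index:end_index]
--         if (item == "Bedrooms") and (i < 1):
--             available_feautures[0] = True
--             i = 1
--         elif (item == "Bathrooms") and (i < 2):
--             available_feautures[1] = True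
--             i = 2
--         elif (item == "Parking Spaces") and (i < 3):
--             available_feautures[2] = True
--             i = 3
--         elif (item == "Erf Size") and (i < 4):
--             available_feautures[3] = True
--             i = 4
--         elif (item == "Floor Size") and (i < 5):
--             available_feautures[4] = True
--             i = 5
--         # Once 'i' is greater than its corresponding feature, we are on a different property
--         else:
--             return available_feautures, return_index
--         start_index = end_index
--     return available_feautures, return_index
-- ===== SOURCE B (Python) =====
-- _ORDER = ('Bedrooms', 'Bathrooms', 'Parking Spaces', 'Erf Size', 'Floor Size')
--
--
-- def get_feature_details(start_index, page):
--     base = page.find('<span class="p24_icons">', start_index) + len('<span class="p24_icons">')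
--     # stage 1: extract the next five title="..." values unconditionally
--     titles, pos = [], base
--     for _ in range(5):
--         s = page.find('title="', pos) + len('title="')
--         e = page.find('"', s)
--         titles.append(page[s:e])
--         pos = e
--     idxs = [_ORDER.index(t) if t in _ORDER else -1 for t in titles]
--     # stage 2: the accepted items are the longest strictly increasing prefix of idxs
--     # (unknown titles give -1, which never extends the prefix)
--     take = 0
--     while take < 5 and idxs[take] > (idxs[take - 1] if take else -1):
--         take += 1
--     # stage 3: render the five flags from the accepted indices
--     flags = [False] * 5
--     for f in idxs[:take]:
--         flags[f] = True
--     return flags, base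
-- ===== Notes on version B (the rewrite author's own statement) =====
-- stated objective: alternative
-- what changed: A's single-pass five-way elif state machine with in-place flag mutation is replaced by three staged passes: extract the next five title values unconditionally, map them to indices through a name table, keep the longest strictly increasing prefix of that index list, and render the five booleans once at the end.
import Mathlib
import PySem

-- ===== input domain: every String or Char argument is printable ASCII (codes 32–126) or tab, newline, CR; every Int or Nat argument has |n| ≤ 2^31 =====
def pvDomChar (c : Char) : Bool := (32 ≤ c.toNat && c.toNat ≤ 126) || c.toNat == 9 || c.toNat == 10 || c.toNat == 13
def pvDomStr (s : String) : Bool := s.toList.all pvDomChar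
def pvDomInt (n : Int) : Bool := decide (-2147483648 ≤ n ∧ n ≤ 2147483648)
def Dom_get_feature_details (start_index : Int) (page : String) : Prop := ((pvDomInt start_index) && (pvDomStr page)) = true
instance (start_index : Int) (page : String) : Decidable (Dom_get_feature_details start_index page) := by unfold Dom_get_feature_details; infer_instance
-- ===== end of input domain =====

-- B replaces A's single-pass five-way elif state machine by three staged passes:
-- extract the next five title values, map them to indices, keep the longest
-- strictly increasing prefix, and render the flags once (objective: alternative).

-- the find/slice lines both Pythons contain verbatim per extraction step:
-- s = page.find('title="', pos) + 7; e = page.find('"', s); item = page[s:e]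
def pvFindTitle (page : String) (pos : Int) : Int :=
  PySem.Str.findFrom page "title=\"" pos none + 7
def pvFindEnd (page : String) (pos : Int) : Int :=
  PySem.Str.findFrom page "\"" (pvFindTitle page pos) none
def pvNextItem (page : String) (pos : Int) : String :=
  PySem.Str.slice page (some (pvFindTitle page pos)) (some (pvFindEnd page pos))

-- ===== PORT A =====
-- A's while loop: state = (flags, i, start_index); returns the flag list (return_index
-- is unchanged by the loop and is paired on by the caller, as A returns it on both exits)
def pvLoopA (page : String) (flags : List Bool) (i start : Int) : List Bool :=
  if _h : i < 5 then
    let item := pvNextItem page start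
    let e := pvFindEnd page start
    if _h1 : item = "Bedrooms" ∧ i < 1 then
      pvLoopA page (flags.set 0 true) 1 e
    else if _h2 : item = "Bathrooms" ∧ i < 2 then
      pvLoopA page (flags.set 1 true) 2 e
    else if _h3 : item = "Parking Spaces" ∧ i < 3 then
      pvLoopA page (flags.set 2 true) 3 e
    else if _h4 : item = "Erf Size" ∧ i < 4 then
      pvLoopA page (flags.set 3 true) 4 e
    else if _h5 : item = "Floor Size" ∧ i < 5 then
      pvLoopA page (flags.set 4 true) 5 e
    else
      flags
  else flags
termination_by (5 - i).toNat
decreasing_by all_goals omega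

def get_feature_details (start_index : Int) (page : String) : List Bool × Int :=
  let start := PySem.Str.findFrom page "<span class=\"p24_icons\">" start_index none + 24
  let return_index := start
  (pvLoopA page [false, false, false, false, false] 0 start, return_index)

-- ===== PORT B =====
def pvOrder : List String :=
  ["Bedrooms", "Bathrooms", "Parking Spaces", "Erf Size", "Floor Size"]

-- _ORDER.index(t) if t in _ORDER else -1  (getD 0 is exact: index? is some under the membership test)
def pvIdx (t : String) : Int :=
  if t ∈ pvOrder then (((PySem.List.index? pvOrder t).getD 0 : Nat) : Int) else -1

-- stage 1: for _ in range(5): append page[s:e]; pos = e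
def pvStage1 (page : String) (base : Int) : List String × Int :=
  (PySem.List.pyRange 0 5 1).foldl
    (fun (st : List String × Int) _ =>
      (st.1 ++ [pvNextItem page st.2], pvFindEnd page st.2))
    ([], base)

-- stage 2: while take < 5 and idxs[take] > (idxs[take-1] if take else -1): take += 1
-- (pyGetD default is exact: both subscripts are in range whenever Python evaluates them)
def pvTakeLoop (idxs : List Int) (take : Nat) : Nat :=
  if _h : take < 5 ∧ PySem.List.pyGetD idxs (take : Int) 0 >
      (if take = 0 then -1 else PySem.List.pyGetD idxs ((take : Int) - 1) 0) then
    pvTakeLoop idxs (take + 1)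
  else take
termination_by 5 - take
decreasing_by omega

def get_feature_details_alt (start_index : Int) (page : String) : List Bool × Int :=
  let base := PySem.Str.findFrom page "<span class=\"p24_icons\">" start_index none + 24
  let idxs := (pvStage1 page base).1.map pvIdx
  let take := pvTakeLoop idxs 0
  -- stage 3: for f in idxs[:take]: flags[f] = True  (f ≥ 0 on the accepted prefix, so toNat is exact)
  let flags := (PySem.List.slice idxs none (some ((take : Nat) : Int))).foldl
      (fun fl f => fl.set f.toNat true) [false, false, false, false, false]
  (flags, base)

-- ===== PRECONDITION & SPEC =====
def Spec_get_feature_details (start_index : Int) (page : String) (out : List Bool × Int) : Prop := out = get_feature_details_alt start_index page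
instance (start_index : Int) (page : String) (out : List Bool × Int) : Decidable (Spec_get_feature_details start_index page out) := by unfold Spec_get_feature_details; infer_instance

-- ===== CLAIM (what is proved, stated in full; the proofs are below) =====
def Claim_equal_get_feature_details : Prop := ∀ (start_index : Int) (page : String), Dom_get_feature_details start_index page → Spec_get_feature_details start_index page (get_feature_details start_index page)

-- ===== LEMMAS AND PROOFS =====

theorem pvIdx_eq (t : String) :
    pvIdx t = (if t = "Bedrooms" then 0 else if t = "Bathrooms" then 1
      else if t = "Parking Spaces" then 2 else if t = "Erf Size" then 3
      else if t = "Floor Size" then 4 else -1) := by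
  by_cases h1 : t = "Bedrooms"
  · subst h1; decide
  by_cases h2 : t = "Bathrooms"
  · subst h2; decide
  by_cases h3 : t = "Parking Spaces"
  · subst h3; decide
  by_cases h4 : t = "Erf Size"
  · subst h4; decide
  by_cases h5 : t = "Floor Size"
  · subst h5; decide
  simp only [h1, h2, h3, h4, h5, if_false]
  unfold pvIdx
  rw [if_neg]
  simp [pvOrder, h1, h2, h3, h4, h5]

theorem pvIdx_bounds (t : String) : -1 ≤ pvIdx t ∧ pvIdx t ≤ 4 := by
  rw [pvIdx_eq]; split_ifs <;> norm_num

-- A's loop rewritten with one uniform guard i ≤ pvIdx item (proof-only helper)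
def pvLoopU (page : String) (flags : List Bool) (i pos : Int) : List Bool :=
  if _h : i < 5 then
    if _h2 : i ≤ pvIdx (pvNextItem page pos) then
      pvLoopU page (flags.set (pvIdx (pvNextItem page pos)).toNat true)
        (pvIdx (pvNextItem page pos) + 1) (pvFindEnd page pos)
    else flags
  else flags
termination_by (5 - i).toNat
decreasing_by omega

theorem pvLoopA_eq_U (page : String) : ∀ (n : Nat) (flags : List Bool) (i pos : Int),
    (5 - i).toNat ≤ n → 0 ≤ i →
    pvLoopA page flags i pos = pvLoopU page flags i pos := by
  intro n
  induction n with
  | zero =>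
    intro flags i pos hn h0
    rw [pvLoopA, pvLoopU]
    have hni : ¬ i < 5 := by omega
    simp [hni]
  | succ n ih =>
    intro flags i pos hn h0
    by_cases h : i < 5
    · conv_lhs => rw [pvLoopA]
      simp only [dif_pos h]
      set item := pvNextItem page pos with hitem
      set e := pvFindEnd page pos with he
      split_ifs with h1 h2 h3 h4 h5
      · have hfv : pvIdx item = 0 := by rw [h1.1]; decide
        rw [pvLoopU, dif_pos h, dif_pos (show i ≤ pvIdx item by obtain ⟨-, hik⟩ := h1; omega), hfv]
        norm_num
        exact ih _ 1 e (by omega) (by omega)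
      · have hfv : pvIdx item = 1 := by rw [h2.1]; decide
        rw [pvLoopU, dif_pos h, dif_pos (show i ≤ pvIdx item by obtain ⟨-, hik⟩ := h2; omega), hfv]
        norm_num
        exact ih _ 2 e (by omega) (by omega)
      · have hfv : pvIdx item = 2 := by rw [h3.1]; decide
        rw [pvLoopU, dif_pos h, dif_pos (show i ≤ pvIdx item by obtain ⟨-, hik⟩ := h3; omega), hfv]
        norm_num
        exact ih _ 3 e (by omega) (by omega)
      · have hfv : pvIdx item = 3 := by rw [h4.1]; decide
        rw [pvLoopU, dif_pos h, dif_pos (show i ≤ pvIdx item by obtain ⟨-, hik⟩ := h4; omega), hfv]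
        norm_num
        exact ih _ 4 e (by omega) (by omega)
      · have hfv : pvIdx item = 4 := by rw [h5.1]; decide
        rw [pvLoopU, dif_pos h, dif_pos (show i ≤ pvIdx item by obtain ⟨-, hik⟩ := h5; omega), hfv]
        norm_num
        exact ih _ 5 e (by omega) (by omega)
      · rw [pvLoopU, dif_pos h, dif_neg]
        intro hle
        rw [← hitem] at hle
        by_cases b1 : item = "Bedrooms"
        · have hfv : pvIdx item = 0 := by rw [b1]; decide
          exact h1 ⟨b1, by omega⟩
        by_cases b2 : item = "Bathrooms"
        · have hfv : pvIdx item = 1 := by rw [b2]; decide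
          exact h2 ⟨b2, by omega⟩
        by_cases b3 : item = "Parking Spaces"
        · have hfv : pvIdx item = 2 := by rw [b3]; decide
          exact h3 ⟨b3, by omega⟩
        by_cases b4 : item = "Erf Size"
        · have hfv : pvIdx item = 3 := by rw [b4]; decide
          exact h4 ⟨b4, by omega⟩
        by_cases b5 : item = "Floor Size"
        · have hfv : pvIdx item = 4 := by rw [b5]; decide
          exact h5 ⟨b5, by omega⟩
        have hfv : pvIdx item = -1 := by
          rw [pvIdx_eq, if_neg b1, if_neg b2, if_neg b3, if_neg b4, if_neg b5]
        omega
    · rw [pvLoopA, pvLoopU]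
      simp [h]

theorem pvStage1_titles (page : String) (base : Int) :
    (pvStage1 page base).1 =
      [pvNextItem page base,
       pvNextItem page (pvFindEnd page base),
       pvNextItem page (pvFindEnd page (pvFindEnd page base)),
       pvNextItem page (pvFindEnd page (pvFindEnd page (pvFindEnd page base))),
       pvNextItem page (pvFindEnd page (pvFindEnd page (pvFindEnd page (pvFindEnd page base))))] := by
  rw [pvStage1, show PySem.List.pyRange 0 5 1 = [0, 1, 2, 3, 4] from by decide]
  simp [List.foldl]

-- the item stream extracted from successive positions (proof-only)
def pvStreamOK (page : String) : Int → List String → Prop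
  | _, [] => True
  | pos, t :: r => t = pvNextItem page pos ∧ pvStreamOK page (pvFindEnd page pos) r

-- the longest strictly increasing prefix, as a recursion on the index list (proof-only)
def pvTakeIncr : List Int → Int → List Int
  | [], _ => []
  | f :: r, prev => if prev < f then f :: pvTakeIncr r f else []

theorem pvG (page : String) : ∀ (ts : List String) (prev pos : Int) (flags : List Bool),
    pvStreamOK page pos ts → -1 ≤ prev → 4 - prev ≤ (ts.length : Int) →
    pvLoopU page flags (prev + 1) pos =
      (pvTakeIncr (ts.map pvIdx) prev).foldl (fun fl f => fl.set f.toNat true) flags := by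
  intro ts
  induction ts with
  | nil =>
    intro prev pos flags _ hp hlen
    rw [pvLoopU, dif_neg (by simp at hlen; omega : ¬ prev + 1 < 5)]
    rfl
  | cons t rest ih =>
    intro prev pos flags hs hp hlen
    obtain ⟨ht, hrest⟩ := hs
    obtain ⟨hb1, hb2⟩ := pvIdx_bounds t
    by_cases h5 : prev + 1 < 5
    · by_cases hc : prev < pvIdx t
      · rw [pvLoopU, dif_pos h5, dif_pos (by rw [← ht]; omega)]
        rw [← ht]
        simp only [List.map, pvTakeIncr, if_pos hc, List.foldl]
        have := ih (pvIdx t) (pvFindEnd page pos) (flags.set (pvIdx t).toNat true)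
          hrest (by omega) (by simp at hlen ⊢; omega)
        exact this
      · rw [pvLoopU, dif_pos h5, dif_neg (by rw [← ht]; omega)]
        simp only [List.map, pvTakeIncr, if_neg hc, List.foldl]
    · rw [pvLoopU, dif_neg h5]
      have : ¬ prev < pvIdx t := by omega
      simp only [List.map, pvTakeIncr, if_neg this, List.foldl]

-- the staged take-loop + slice compute exactly that prefix (pure, by unrolling)
theorem pvH (f0 f1 f2 f3 f4 : Int) :
    PySem.List.slice [f0, f1, f2, f3, f4] none
        (some ((pvTakeLoop [f0, f1, f2, f3, f4] 0 : Nat) : Int)) =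
      pvTakeIncr [f0, f1, f2, f3, f4] (-1) := by
  have s0 : pvTakeLoop [f0, f1, f2, f3, f4] 0 = if -1 < f0 then pvTakeLoop [f0, f1, f2, f3, f4] 1 else 0 := by
    rw [pvTakeLoop]; norm_num [PySem.List.pyGetD_ofNat']
  have s1 : pvTakeLoop [f0, f1, f2, f3, f4] 1 = if f0 < f1 then pvTakeLoop [f0, f1, f2, f3, f4] 2 else 1 := by
    rw [pvTakeLoop]; norm_num [PySem.List.pyGetD_ofNat']
  have s2 : pvTakeLoop [f0, f1, f2, f3, f4] 2 = if f1 < f2 then pvTakeLoop [f0, f1, f2, f3, f4] 3 else 2 := by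
    rw [pvTakeLoop]; norm_num [PySem.List.pyGetD_ofNat']
  have s3 : pvTakeLoop [f0, f1, f2, f3, f4] 3 = if f2 < f3 then pvTakeLoop [f0, f1, f2, f3, f4] 4 else 3 := by
    rw [pvTakeLoop]; norm_num [PySem.List.pyGetD_ofNat']
  have s4 : pvTakeLoop [f0, f1, f2, f3, f4] 4 = if f3 < f4 then pvTakeLoop [f0, f1, f2, f3, f4] 5 else 4 := by
    rw [pvTakeLoop]; norm_num [PySem.List.pyGetD_ofNat']
  have s5 : pvTakeLoop [f0, f1, f2, f3, f4] 5 = 5 := by rw [pvTakeLoop]; norm_num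
  by_cases c0 : -1 < f0
  · by_cases c1 : f0 < f1
    · by_cases c2 : f1 < f2
      · by_cases c3 : f2 < f3
        · by_cases c4 : f3 < f4
          · rw [s0, if_pos c0, s1, if_pos c1, s2, if_pos c2, s3, if_pos c3, s4, if_pos c4, s5]
            simp [PySem.List.slice_to, pvTakeIncr, c0, c1, c2, c3, c4]
          · rw [s0, if_pos c0, s1, if_pos c1, s2, if_pos c2, s3, if_pos c3, s4, if_neg c4]
            simp [PySem.List.slice_to, pvTakeIncr, c0, c1, c2, c3, c4]
        · rw [s0, if_pos c0, s1, if_pos c1, s2, if_pos c2, s3, if_neg c3]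
          simp [PySem.List.slice_to, pvTakeIncr, c0, c1, c2, c3]
      · rw [s0, if_pos c0, s1, if_pos c1, s2, if_neg c2]
        simp [PySem.List.slice_to, pvTakeIncr, c0, c1, c2]
    · rw [s0, if_pos c0, s1, if_neg c1]
      simp [PySem.List.slice_to, pvTakeIncr, c0, c1]
  · rw [s0, if_neg c0]
    simp [PySem.List.slice_to, pvTakeIncr, c0]

-- the two sides agree once both are expressed over the five extracted indices
theorem pvLoopU_eq_B (page : String) (base : Int) (flags : List Bool) :
    pvLoopU page flags 0 base =
      (PySem.List.slice ((pvStage1 page base).1.map pvIdx) none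
          (some ((pvTakeLoop ((pvStage1 page base).1.map pvIdx) 0 : Nat) : Int))).foldl
        (fun fl f => fl.set f.toNat true) flags := by
  rw [pvStage1_titles]
  simp only [List.map]
  rw [pvH]
  have hg := pvG page
    [pvNextItem page base,
     pvNextItem page (pvFindEnd page base),
     pvNextItem page (pvFindEnd page (pvFindEnd page base)),
     pvNextItem page (pvFindEnd page (pvFindEnd page (pvFindEnd page base))),
     pvNextItem page (pvFindEnd page (pvFindEnd page (pvFindEnd page (pvFindEnd page base))))]
    (-1) base flags
    (by refine ⟨rfl, rfl, rfl, rfl, rfl, trivial⟩) (by norm_num) (by simp)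
  simpa using hg

-- ===== VERDICT (by name: the statement is the Claim_ definition above) =====
theorem get_feature_details_spec : Claim_equal_get_feature_details := by
  intro start_index page _
  show get_feature_details start_index page = get_feature_details_alt start_index page
  simp only [get_feature_details, get_feature_details_alt]
  rw [pvLoopA_eq_U page 5 _ 0 _ (by omega) (by omega), pvLoopU_eq_B]
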